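-- pv_equiv track=rewrite | github.com/LeoTsui/CS259D_Notes_HW | hw/hw1/ecm.py | co_occurrence_rm_ls
-- ===== SOURCE A (Python) =====
-- L = 100  # a series of sequences
--
-- w = 6  # window size, accordance with paper
--
-- def observation_events(user_dict, user, seq):
--     return user_dict[user][L * (seq - 1):L * seq]
--
-- def co_occurrence_rm_ls(user_dict):
--     cmd1 = "rm"
--     cmd2 = "ls"
--     co = []
--     for u in [1, 2]:
--         u_seq = []
--         for s in range(1, 6):
--             seq = observation_events(user_dict, u, s)
--             c = sum(seq[_:_ + w].count(cmd2) if seq[_] == cmd1 else 0 for _ in range(len(seq)))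
--             u_seq.append(c)
--         co.append(u_seq)
--     return co
-- ===== SOURCE B (Python) =====
-- L = 100  # a series of sequences
--
-- w = 6  # window size, accordance with paper
--
-- def _pair_count(seq):
--     # stage 1: prefix counts of "ls" (pref[k] = number of "ls" in seq[:k])
--     pref = [0]
--     for e in seq:
--         pref.append(pref[-1] + (e == "ls"))
--     # stage 2: each "rm" at i contributes pref[min(len(seq), i + w)] - pref[i]
--     n = len(seq)
--     return sum(pref[min(n, i + w)] - pref[i] for i, e in enumerate(seq) if e == "rm")
--
-- def co_occurrence_rm_ls(user_dict):
--     return [[_pair_count(user_dict[u][L * (s - 1):L * s]) for s in range(1, 6)]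
--             for u in [1, 2]]
-- ===== Notes on version B (the rewrite author's own statement) =====
-- stated objective: alternative
-- what changed: B replaces A's per-'rm' inner window scan (seq[i:i+w].count('ls')) by a two-stage pass: it first builds a prefix-count table of 'ls' occurrences, then each 'rm' at i contributes the prefix difference pref[min(n,i+w)] - pref[i], eliminating the inner slice-and-count entirely; the outer user/sequence loops become comprehensions.
import Mathlib
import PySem

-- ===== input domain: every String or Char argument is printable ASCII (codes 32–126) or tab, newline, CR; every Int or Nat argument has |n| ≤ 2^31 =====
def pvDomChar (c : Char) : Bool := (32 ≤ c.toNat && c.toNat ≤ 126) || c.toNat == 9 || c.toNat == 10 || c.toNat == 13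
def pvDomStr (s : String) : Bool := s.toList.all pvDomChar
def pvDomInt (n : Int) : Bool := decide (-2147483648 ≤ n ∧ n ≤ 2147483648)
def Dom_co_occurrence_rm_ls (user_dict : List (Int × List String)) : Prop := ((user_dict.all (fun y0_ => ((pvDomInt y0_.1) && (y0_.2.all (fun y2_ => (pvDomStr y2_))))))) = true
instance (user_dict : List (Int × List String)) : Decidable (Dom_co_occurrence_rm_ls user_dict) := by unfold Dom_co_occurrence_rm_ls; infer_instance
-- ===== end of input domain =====

-- B replaces the per-'rm' window scan by a precomputed prefix-count table of 'ls', so each 'rm'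
-- contributes a prefix difference instead of an inner slice count (objective: alternative).

-- module constants L = 100, w = 6
def pvL : Int := 100
def pvW : Int := 6

-- ===== PORT A =====
def observation_events (user_dict : List (Int × List String)) (user : Int) (seq : Int) : List String :=
  PySem.List.slice ((PySem.Dict.get? (PySem.Dict.mk user_dict) user).getD [])
    (some (pvL * (seq - 1))) (some (pvL * seq))

def co_occurrence_rm_ls (user_dict : List (Int × List String)) : List (List Int) :=
  let cmd1 := "rm"
  let cmd2 := "ls"
  let co : List (List Int) := []
  [(1 : Int), 2].foldl (fun co u =>
    let u_seq : List Int := []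
    co ++ [(PySem.List.pyRange 1 6 1).foldl (fun u_seq s =>
      let seq := observation_events user_dict u s
      let c : Int := ((PySem.List.pyRange 0 (PySem.List.len seq) 1).map (fun i =>
        if PySem.List.pyGetD seq i "" = cmd1 then
          (PySem.List.count (PySem.List.slice seq (some i) (some (i + pvW))) cmd2 : Int)
        else 0)).sum
      u_seq ++ [c]) u_seq]) co

-- ===== PORT B =====
-- stage 1 of Source B: pref = [0]; for e in seq: pref.append(pref[-1] + (e == "ls"))
def pvPref (seq : List String) : List Int :=
  seq.foldl (fun p e => p ++ [PySem.List.pyGetD p (-1) 0 + (if e == "ls" then 1 else 0)]) [(0 : Int)]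

-- stage 2 of Source B (pref[..] indices are always in range, so pyGetD is exact here)
def pvPairCount (seq : List String) : Int :=
  let pref := pvPref seq
  let n : Int := PySem.List.len seq
  (((PySem.List.enumerate seq).filter (fun p => p.2 == "rm")).map (fun p =>
    PySem.List.pyGetD pref (min n (p.1 + pvW)) 0 - PySem.List.pyGetD pref p.1 0)).sum

def co_occurrence_rm_ls_alt (user_dict : List (Int × List String)) : List (List Int) :=
  [(1 : Int), 2].map (fun u =>
    (PySem.List.pyRange 1 6 1).map (fun s =>
      pvPairCount (PySem.List.slice ((PySem.Dict.get? (PySem.Dict.mk user_dict) u).getD [])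
        (some (pvL * (s - 1))) (some (pvL * s)))))

-- ===== PRECONDITION & SPEC =====
-- Pre_ excludes exactly the dicts missing key 1 or key 2, on which Python A raises KeyError.
def Pre_co_occurrence_rm_ls (user_dict : List (Int × List String)) : Prop :=
  (PySem.Dict.mk user_dict).contains 1 = true ∧ (PySem.Dict.mk user_dict).contains 2 = true
instance (user_dict : List (Int × List String)) : Decidable (Pre_co_occurrence_rm_ls user_dict) := by unfold Pre_co_occurrence_rm_ls; infer_instance

def pvWitness_co_occurrence_rm_ls : (List (Int × List String)) := [(1, ["rm", "ls"]), (2, [])]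

def Spec_co_occurrence_rm_ls (user_dict : List (Int × List String)) (out : List (List Int)) : Prop := out = co_occurrence_rm_ls_alt user_dict
instance (user_dict : List (Int × List String)) (out : List (List Int)) : Decidable (Spec_co_occurrence_rm_ls user_dict out) := by unfold Spec_co_occurrence_rm_ls; infer_instance

-- ===== CLAIM (what is proved, stated in full; the proofs are below) =====
def Claim_equal_co_occurrence_rm_ls : Prop := ∀ (user_dict : List (Int × List String)), Dom_co_occurrence_rm_ls user_dict → Pre_co_occurrence_rm_ls user_dict → Spec_co_occurrence_rm_ls user_dict (co_occurrence_rm_ls user_dict)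

-- ===== LEMMAS AND PROOFS =====

-- the prefix table really is the table of prefix counts of "ls"
theorem pvPref_eq (seq : List String) :
    pvPref seq = (List.range (seq.length + 1)).map (fun k => ((seq.take k).count "ls" : Int)) := by
  induction seq using List.reverseRecOn with
  | nil => simp [pvPref]
  | append_singleton t x ih =>
    unfold pvPref at ih ⊢
    rw [List.foldl_append, ih, List.foldl_cons, List.foldl_nil]
    have hlast : PySem.List.pyGetD ((List.range (t.length + 1)).map
        (fun k => ((t.take k).count "ls" : Int))) (-1) 0 = ((t.take t.length).count "ls" : Int) := by
      rw [List.range_succ, List.map_append]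
      exact PySem.List.pyGetD_neg_one_append_singleton _ _ _
    rw [hlast]
    simp only [List.length_append, List.length_cons, List.length_nil]
    rw [List.range_succ (n := t.length + 1), List.map_append]
    congr 1
    · apply List.map_congr_left
      intro k hk
      simp only [List.mem_range] at hk
      rw [List.take_append_of_le_length (by omega)]
    · simp only [List.map_cons, List.map_nil]
      congr 1
      rw [List.take_length, List.take_of_length_le (by simp), List.count_append]
      by_cases h : x = "ls" <;> simp [h]

theorem pvPref_getD (seq : List String) (k : ℕ) (hk : k ≤ seq.length) :
    (pvPref seq).getD k 0 = ((seq.take k).count "ls" : Int) := by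
  rw [pvPref_eq, PySem.List.getD_map_range _ _ _ _ (by omega)]

theorem pv_filter_map_sum {α : Type} (l : List α) (p : α → Bool) (g : α → ℤ) :
    ((l.filter p).map g).sum = (l.map (fun x => if p x then g x else 0)).sum := by
  induction l with
  | nil => rfl
  | cons x t ih => by_cases h : p x <;> simp [h, ih]

theorem pv_sum_map_range (n : ℕ) (f : ℕ → ℤ) :
    ((List.range n).map f).sum = ∑ i ∈ Finset.range n, f i := rfl

-- prefix difference = count in the clamped forward window
theorem pv_pref_diff (seq : List String) (x : ℕ) :
    ((seq.take (min seq.length (x + 6))).count "ls" : Int) - ((seq.take x).count "ls" : Int)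
      = (((seq.drop x).take 6).count "ls" : Int) := by
  have h1 : seq.take (min seq.length (x + 6)) = seq.take (x + 6) := by
    rcases Nat.le_total (x + 6) seq.length with h | h
    · rw [min_eq_right h]
    · rw [min_eq_left (by omega), List.take_length, List.take_of_length_le (by omega)]
  rw [h1, List.take_add, List.count_append]
  push_cast
  ring

-- the inner sums of A and B coincide on every sequence
theorem pv_core (l : List String) :
    ((PySem.List.pyRange 0 (PySem.List.len l) 1).map (fun i =>
        if PySem.List.pyGetD l i "" = "rm" then
          (PySem.List.count (PySem.List.slice l (some i) (some (i + pvW))) "ls" : Int)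
        else 0)).sum = pvPairCount l := by
  have hc : ∀ k : ℕ, ((k : ℤ) + 6) = ((k + 6 : ℕ) : ℤ) := by intro k; push_cast; ring
  have hmin : ∀ k : ℕ, min ((l.length : ℤ)) ((k : ℕ) : ℤ) = ((min l.length k : ℕ) : ℤ) := by
    intro k; omega
  rw [pvPairCount, PySem.List.enumerate_eq_map_pyRange l "", pv_filter_map_sum]
  simp only [pvW, PySem.List.len_eq, PySem.List.pyRange_zero_nat, List.map_map,
    Function.comp, PySem.List.pyGetD_natCast, hc, hmin, PySem.List.slice_natCast,
    Nat.add_sub_cancel_left, PySem.List.count_eq, pv_sum_map_range]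
  apply Finset.sum_congr rfl
  intro x hx
  simp only [Finset.mem_range] at hx
  by_cases h : l.getD x "" = "rm"
  · rw [if_pos h, if_pos (by simpa using h)]
    rw [pvPref_getD l _ (min_le_left _ _), pvPref_getD l x (by omega), pv_pref_diff]
  · rw [if_neg h, if_neg (by simpa using h)]

-- ===== VERDICT (by name: the statement is the Claim_ definition above) =====
theorem co_occurrence_rm_ls_spec : Claim_equal_co_occurrence_rm_ls := by
  intro user_dict _ _
  unfold Spec_co_occurrence_rm_ls co_occurrence_rm_ls co_occurrence_rm_ls_alt
  simp only [List.foldl, List.map, List.nil_append, observation_events,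
    PySem.List.foldl_append_singleton_eq_map, pv_core]
  rfl
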